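-- pv_equiv track=rewrite | github.com/TakeshiHenderson/GNN2 | src/test.py | tokens_to_latex
-- ===== SOURCE A (Python) =====
-- def tokens_to_latex(latex_tokens):
--     """
--     Process generated tokens to actual LaTeX syntax using relations.
--
--     Converts tokens like ['y(-)', 'i(Sub)', '<EOS>(-)', '=(Right)']
--     to clean LaTeX: 'y_{i} = ...'
--
--     Relations:
--         - Sub: subscript (_)
--         - Sup/Above: superscript (^)
--         - Right/-: horizontal (space or nothing)
--         - Inside: sqrt contents
--         - Below: under (for fractions, etc.)
--
--     Args:
--         latex_tokens: List of tokens in format 'symbol(relation)'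
--
--     Returns:
--         str: Clean LaTeX string
--     """
--     result = []
--     i = 0
--
--     while i < len(latex_tokens):
--         token = latex_tokens[i]
--
--         # Parse symbol and relation
--         if '(' in token:
--             idx = token.rfind('(')
--             symbol = token[:idx]
--             relation = token[idx+1:-1]  # Remove ( and )
--         else:
--             symbol = token
--             relation = '-'
--
--         # Skip EOS, SOS, PAD tokens
--         if symbol in ('<EOS>', '<SOS>', '<PAD>', ''):
--             i += 1
--             continue
--
--         # Build LaTeX based on relation
--         if relation == 'Sub':
--             result.append(f'_{{{symbol}}}')
--         elif relation in ('Sup', 'Above'):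
--             result.append(f'^{{{symbol}}}')
--         elif relation == 'Inside':
--             result.append(f'\\sqrt{{{symbol}}}')
--         elif relation == 'Below':
--             # For fractions - combine with previous if possible
--             if result and not result[-1].startswith('\\frac'):
--                 prev = result.pop()
--                 result.append(f'\\frac{{{prev}}}{{{symbol}}}')
--             else:
--                 result.append(f'_{{{symbol}}}')  # Fallback to subscript
--         else:
--             # Right, -, or unknown - just append the symbol
--             result.append(symbol)
--
--         i += 1
--
--     return ' '.join(result)
-- ===== SOURCE B (Python) =====
-- def tokens_to_latex(latex_tokens):
--     # Parse every token into (symbol, relation) and drop control symbols.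
--     def parse(tok):
--         i = tok.rfind('(')
--         return (tok[:i], tok[i + 1:-1]) if i >= 0 else (tok, '-')
--     pairs = [p for p in map(parse, latex_tokens) if p[0] not in ('<EOS>', '<SOS>', '<PAD>', '')]
--
--     # Context-free rendering of one pair (a Below that is not merged becomes a subscript).
--     def base(s, r):
--         if r == 'Sub' or r == 'Below':
--             return '_{' + s + '}'
--         if r == 'Sup' or r == 'Above':
--             return '^{' + s + '}'
--         if r == 'Inside':
--             return '\\sqrt{' + s + '}'
--         return s
--
--     # Render with one-pair LOOKAHEAD: a non-\frac piece followed by a Below pair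
--     # is emitted as a fraction, consuming both pairs; no piece is ever revisited.
--     out = []
--     i = 0
--     n = len(pairs)
--     while i < n:
--         piece = base(*pairs[i])
--         if i + 1 < n and pairs[i + 1][1] == 'Below' and not piece.startswith('\\frac'):
--             out.append('\\frac{' + piece + '}{' + pairs[i + 1][0] + '}')
--             i += 2
--         else:
--             out.append(piece)
--             i += 1
--     return ' '.join(out)
-- ===== Notes on version B (the rewrite author's own statement) =====
-- stated objective: alternative
-- what changed: B first parses/filters the tokens into (symbol, relation) pairs, then renders them with a one-pair LOOKAHEAD that emits \frac{piece}{next} by consuming two pairs at once, replacing A's stateful backtracking loop that pops result[-1] when it meets a Below relation.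
import Mathlib
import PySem

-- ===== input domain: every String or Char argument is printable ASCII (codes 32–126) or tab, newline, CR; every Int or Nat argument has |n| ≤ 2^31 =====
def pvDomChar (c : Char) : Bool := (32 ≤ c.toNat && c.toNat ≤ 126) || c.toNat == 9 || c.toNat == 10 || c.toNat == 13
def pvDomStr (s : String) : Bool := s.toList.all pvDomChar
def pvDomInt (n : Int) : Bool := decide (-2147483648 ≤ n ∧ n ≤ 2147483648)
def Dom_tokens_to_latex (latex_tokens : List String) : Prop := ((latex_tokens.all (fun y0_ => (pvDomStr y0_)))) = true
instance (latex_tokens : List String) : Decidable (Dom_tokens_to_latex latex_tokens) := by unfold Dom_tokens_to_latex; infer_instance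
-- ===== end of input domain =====

-- B parses tokens to (symbol, relation) pairs, then renders with a one-pair lookahead that consumes two pairs for a fraction, instead of A's loop that pops result[-1]; same return value, not faster.


-- ===== PORT A =====
-- the skip tuple ('<EOS>', '<SOS>', '<PAD>', '') of both Pythons
def skipSym (s : String) : Bool := s == "<EOS>" || s == "<SOS>" || s == "<PAD>" || s == ""

-- one iteration of A's while-loop: parse the token inline, then the if/elif chain
def stepA (result : List String) (token : String) : List String :=
  let sr : String × String :=
    if PySem.Str.isIn "(" token then
      let idx := PySem.Str.rfind token "("
      (PySem.Str.slice token none (some idx), PySem.Str.slice token (some (idx + 1)) (some (-1)))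
    else (token, "-")
  let symbol := sr.1
  let relation := sr.2
  if skipSym symbol then result
  else if relation == "Sub" then result ++ ["_{" ++ symbol ++ "}"]
  else if relation == "Sup" || relation == "Above" then result ++ ["^{" ++ symbol ++ "}"]
  else if relation == "Inside" then result ++ ["\\sqrt{" ++ symbol ++ "}"]
  else if relation == "Below" then
    match result.getLast? with
    | some prev =>
        if !(PySem.Str.startswith prev "\\frac") then
          result.dropLast ++ ["\\frac{" ++ prev ++ "}{" ++ symbol ++ "}"]
        else result ++ ["_{" ++ symbol ++ "}"]
    | none => result ++ ["_{" ++ symbol ++ "}"]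
  else result ++ [symbol]

def tokens_to_latex (latex_tokens : List String) : String :=
  PySem.Str.join " " (latex_tokens.foldl stepA [])

-- ===== PORT B =====
-- B's parse: rfind-based split into (symbol, relation)
def parseB (token : String) : String × String :=
  let i := PySem.Str.rfind token "("
  if 0 ≤ i then
    (PySem.Str.slice token none (some i), PySem.Str.slice token (some (i + 1)) (some (-1)))
  else (token, "-")

-- B's context-free rendering of one pair (an unmerged Below becomes a subscript)
def baseB (p : String × String) : String :=
  if p.2 == "Sub" || p.2 == "Below" then "_{" ++ p.1 ++ "}"
  else if p.2 == "Sup" || p.2 == "Above" then "^{" ++ p.1 ++ "}"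
  else if p.2 == "Inside" then "\\sqrt{" ++ p.1 ++ "}"
  else p.1

-- B's lookahead render loop: consumes one pair, or two when a fraction is formed
def renderLA : List (String × String) → List String
  | [] => []
  | [p] => [baseB p]
  | p :: q :: rest =>
      let piece := baseB p
      if q.2 == "Below" && !(PySem.Str.startswith piece "\\frac") then
        ("\\frac{" ++ piece ++ "}{" ++ q.1 ++ "}") :: renderLA rest
      else piece :: renderLA (q :: rest)

def tokens_to_latex_alt (latex_tokens : List String) : String :=
  let pairs := (latex_tokens.map parseB).filter (fun p => !skipSym p.1)
  PySem.Str.join " " (renderLA pairs)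

-- ===== PRECONDITION & SPEC =====
def Spec_tokens_to_latex (latex_tokens : List String) (out : String) : Prop := out = tokens_to_latex_alt latex_tokens
instance (latex_tokens : List String) (out : String) : Decidable (Spec_tokens_to_latex latex_tokens out) := by unfold Spec_tokens_to_latex; infer_instance

-- ===== CLAIM (what is proved, stated in full; the proofs are below) =====
def Claim_equal_tokens_to_latex : Prop := ∀ (latex_tokens : List String), Dom_tokens_to_latex latex_tokens → Spec_tokens_to_latex latex_tokens (tokens_to_latex latex_tokens)

-- ===== LEMMAS AND PROOFS =====

-- rfind.go finds an occurrence at an index ≤ k iff one exists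
theorem rfind_go_nonneg_iff (s sub : List Char) (k : Nat) :
    0 ≤ PySem.Chars.rfind.go s sub k ↔ ∃ j ≤ k, sub.isPrefixOf (s.drop j) = true := by
  induction k with
  | zero =>
    simp [PySem.Chars.rfind.go]
    split <;> simp_all
  | succ n ih =>
    rw [show PySem.Chars.rfind.go s sub (n + 1)
        = if sub.isPrefixOf (List.drop (n + 1) s) = true then ((n : Int) + 1)
          else PySem.Chars.rfind.go s sub n from rfl]
    split
    · constructor
      · intro _; exact ⟨n + 1, le_refl _, by assumption⟩
      · intro _; positivity
    · rw [ih]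
      constructor
      · rintro ⟨j, hj, hp⟩; exact ⟨j, Nat.le_succ_of_le hj, hp⟩
      · rintro ⟨j, hj, hp⟩
        by_cases h : j ≤ n
        · exact ⟨j, h, hp⟩
        · have : j = n + 1 := by omega
          subst this; simp_all

-- '(' occurs in the token iff its rfind is ≥ 0
theorem isIn_iff_rfind_nonneg (token : String) :
    PySem.Str.isIn "(" token = true ↔ 0 ≤ PySem.Str.rfind token "(" := by
  rw [PySem.Str.rfind_eq, PySem.Chars.rfind,
      rfind_go_nonneg_iff token.toList "(".toList token.toList.length]
  rw [show PySem.Str.isIn "(" token = PySem.Chars.isIn "(".toList token.toList from rfl]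
  rw [← PySem.Chars.exists_prefix_drop_iff_isIn]
  constructor
  · rintro ⟨j, hp⟩
    by_cases hj : j ≤ token.toList.length
    · exact ⟨j, hj, List.isPrefixOf_iff_prefix.mpr hp⟩
    · exfalso
      rw [List.drop_eq_nil_of_le (le_of_not_ge hj)] at hp
      simp [List.prefix_nil] at hp
  · rintro ⟨j, _, hp⟩; exact ⟨j, List.isPrefixOf_iff_prefix.mp hp⟩

-- a string built as "\frac{…" starts with "\frac"
theorem startswith_frac (x : String) :
    PySem.Str.startswith ("\\frac{" ++ x) "\\frac" = true := by
  simp only [PySem.Str.startswith_eq, String.toList_append]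
  rw [PySem.Chars.startswith_iff]
  exact List.IsPrefix.trans ⟨['{'], rfl⟩ (List.prefix_append _ _)

-- A's chain on one pair (proof-side name for the branch A takes after parse and skip)
def chainStep (result : List String) (p : String × String) : List String :=
  if p.2 == "Sub" then result ++ ["_{" ++ p.1 ++ "}"]
  else if p.2 == "Sup" || p.2 == "Above" then result ++ ["^{" ++ p.1 ++ "}"]
  else if p.2 == "Inside" then result ++ ["\\sqrt{" ++ p.1 ++ "}"]
  else if p.2 == "Below" then
    match result.getLast? with
    | some prev =>
        if !(PySem.Str.startswith prev "\\frac") then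
          result.dropLast ++ ["\\frac{" ++ prev ++ "}{" ++ p.1 ++ "}"]
        else result ++ ["_{" ++ p.1 ++ "}"]
    | none => result ++ ["_{" ++ p.1 ++ "}"]
  else result ++ [p.1]

-- the lookahead step of renderLA on a pending piece (proof-side helper)
def mergeLA (piece : String) : List (String × String) → List String
  | [] => [piece]
  | q :: rest =>
      if q.2 == "Below" && !(PySem.Str.startswith piece "\\frac") then
        ("\\frac{" ++ piece ++ "}{" ++ q.1 ++ "}") :: renderLA rest
      else piece :: renderLA (q :: rest)

theorem renderLA_cons (p : String × String) (ps : List (String × String)) :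
    renderLA (p :: ps) = mergeLA (baseB p) ps := by
  cases ps <;> rfl

-- one A-step = parse with B's parser, then skip or A's chain
theorem stepA_eq_chain (result : List String) (token : String) :
    stepA result token =
      (if skipSym (parseB token).1 then result else chainStep result (parseB token)) := by
  by_cases h : PySem.Str.isIn "(" token = true
  · have h0 : 0 ≤ PySem.Str.rfind token "(" := (isIn_iff_rfind_nonneg token).mp h
    simp only [stepA, parseB, chainStep, h, if_pos h0, if_true]
  · have h0 : ¬ 0 ≤ PySem.Str.rfind token "(" := fun hc =>
      h ((isIn_iff_rfind_nonneg token).mpr hc)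
    simp only [stepA, parseB, chainStep, h, if_neg h0, Bool.false_eq_true, if_false]

-- A's token fold = A's chain folded over B's parsed, filtered pairs
theorem foldA_eq_fold_chain (ts : List String) (res : List String) :
    ts.foldl stepA res
      = ((ts.map parseB).filter (fun p => !skipSym p.1)).foldl chainStep res := by
  induction ts generalizing res with
  | nil => rfl
  | cons t ts ih =>
    simp only [List.foldl_cons, List.map_cons, List.filter_cons]
    rw [stepA_eq_chain]
    by_cases hs : skipSym (parseB t).1 = true
    · simp [hs, ih]
    · simp [eq_false_of_ne_true hs, ih]

-- chainStep on a result ending in `piece`, by cases on the relation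
theorem chainStep_concat (acc : List String) (piece : String) (p : String × String) :
    chainStep (acc ++ [piece]) p
      = if p.2 == "Below" && !(PySem.Str.startswith piece "\\frac") then
          acc ++ ["\\frac{" ++ piece ++ "}{" ++ p.1 ++ "}"]
        else (acc ++ [piece]) ++ [baseB p] := by
  obtain ⟨s, r⟩ := p
  simp only [chainStep, baseB, List.getLast?_concat, List.dropLast_concat]
  by_cases h1 : r = "Sub"; · subst h1; rfl
  by_cases h2 : r = "Sup"; · subst h2; rfl
  by_cases h3 : r = "Above"; · subst h3; rfl
  by_cases h4 : r = "Inside"; · subst h4; rfl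
  by_cases h5 : r = "Below"
  · subst h5
    simp only [show ("Below" == "Sub") = false from rfl, show ("Below" == "Sup") = false from rfl,
      show ("Below" == "Above") = false from rfl, show ("Below" == "Inside") = false from rfl,
      show ("Below" == "Below") = true from rfl, Bool.false_or, Bool.true_and,
      Bool.false_eq_true, if_false]
    simp
  · have e1 : (r == "Sub") = false := beq_eq_false_iff_ne.mpr h1
    have e2 : (r == "Sup") = false := beq_eq_false_iff_ne.mpr h2
    have e3 : (r == "Above") = false := beq_eq_false_iff_ne.mpr h3
    have e4 : (r == "Inside") = false := beq_eq_false_iff_ne.mpr h4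
    have e5 : (r == "Below") = false := beq_eq_false_iff_ne.mpr h5
    simp [e1, e2, e3, e4, e5]

-- folding A's chain from a result ending in `piece` = the lookahead merge of `piece` with the rest
theorem fold_chain_concat (ps : List (String × String)) (acc : List String) (piece : String) :
    ps.foldl chainStep (acc ++ [piece]) = acc ++ mergeLA piece ps := by
  induction ps generalizing acc piece with
  | nil => rfl
  | cons q rest ih =>
    simp only [List.foldl_cons, chainStep_concat]
    by_cases hc : (q.2 == "Below" && !(PySem.Str.startswith piece "\\frac")) = true
    · rw [if_pos hc, ih]
      have hf : PySem.Str.startswith ("\\frac{" ++ piece ++ "}{" ++ q.1 ++ "}") "\\frac" = true := by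
        rw [show "\\frac{" ++ piece ++ "}{" ++ q.1 ++ "}"
            = "\\frac{" ++ (piece ++ "}{" ++ q.1 ++ "}") by simp [String.append_assoc]]
        exact startswith_frac _
      have hm : mergeLA ("\\frac{" ++ piece ++ "}{" ++ q.1 ++ "}") rest
          = ("\\frac{" ++ piece ++ "}{" ++ q.1 ++ "}") :: renderLA rest := by
        cases rest with
        | nil => rfl
        | cons q' rest' =>
          simp only [mergeLA.eq_2, hf, Bool.not_true, Bool.and_false, Bool.false_eq_true, if_false]
      have hm2 : mergeLA piece (q :: rest)
          = ("\\frac{" ++ piece ++ "}{" ++ q.1 ++ "}") :: renderLA rest := by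
        simp only [mergeLA.eq_2]; rw [if_pos hc]
      rw [hm, hm2]
    · rw [if_neg hc, ih]
      have hm : mergeLA piece (q :: rest) = piece :: mergeLA (baseB q) rest := by
        simp only [mergeLA.eq_2]; rw [if_neg hc, renderLA_cons]
      rw [hm]
      simp

-- A's chain folded from [] = B's lookahead render
theorem fold_chain_eq_renderLA (ps : List (String × String)) :
    ps.foldl chainStep [] = renderLA ps := by
  cases ps with
  | nil => rfl
  | cons p rest =>
    have hbase : chainStep [] p = [baseB p] := by
      obtain ⟨s, r⟩ := p
      simp only [chainStep, baseB, List.getLast?_nil]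
      by_cases h1 : r = "Sub"; · subst h1; rfl
      by_cases h2 : r = "Sup"; · subst h2; rfl
      by_cases h3 : r = "Above"; · subst h3; rfl
      by_cases h4 : r = "Inside"; · subst h4; rfl
      by_cases h5 : r = "Below"; · subst h5; rfl
      have e1 : (r == "Sub") = false := beq_eq_false_iff_ne.mpr h1
      have e2 : (r == "Sup") = false := beq_eq_false_iff_ne.mpr h2
      have e3 : (r == "Above") = false := beq_eq_false_iff_ne.mpr h3
      have e4 : (r == "Inside") = false := beq_eq_false_iff_ne.mpr h4
      have e5 : (r == "Below") = false := beq_eq_false_iff_ne.mpr h5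
      simp [e1, e2, e3, e4, e5]
    rw [List.foldl_cons, hbase, show [baseB p] = [] ++ [baseB p] from rfl,
      fold_chain_concat, List.nil_append, renderLA_cons]

-- ===== VERDICT (by name: the statement is the Claim_ definition above) =====
theorem tokens_to_latex_spec : Claim_equal_tokens_to_latex := by
  intro latex_tokens _
  unfold Spec_tokens_to_latex tokens_to_latex tokens_to_latex_alt
  rw [foldA_eq_fold_chain, fold_chain_eq_renderLA]
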